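-- pv_equiv track=rewrite | github.com/meng89/xl | xl.py | _read_till_strings
-- ===== SOURCE A (Python) =====
-- def _read_till_strings(text, i, strings):
--     old_s = None
--     old_i = None
--     end_s = None
--     for string in strings:
--         new_s, new_i = _read_till(text, i, string)
--         if old_s is None:
--             old_s = new_s
--             old_i = new_i
--             end_s = string
--         else:
--             if len(new_s) < len(old_s):
--                 old_s = new_s
--                 old_i = new_i
--                 end_s = string
--
--     return old_s, old_i, end_s
--
-- def _read_till(text: str, i: int, stop_s: str):
--     index = text.find(stop_s, i)
--     if index > -1:
--         return text[i:index], index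
--     else:
--         return text[i:], len(text)
-- ===== SOURCE B (Python) =====
-- def _read_till_strings(text, i, strings):
--     if not strings:
--         return None, None, None
--     for j in range(i, len(text)):
--         for p in strings:
--             if text.startswith(p, j):
--                 return text[i:j], j, p
--     return text[i:], len(text), strings[0]
-- ===== Notes on version B (the rewrite author's own statement) =====
-- stated objective: faster
-- what changed: A runs text.find once per pattern over the whole text and keeps the minimum-length prefix; B does one left-to-right scan from the cursor and returns at the first position where some pattern starts (first such pattern in list order), so it exits at the earliest match instead of running every pattern's find to the end; Pre_ restricts the cursor to its natural domain i >= 0, since for negative i A's value comes from str.find's slice-style negative-index clamping while B scans forward from i.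
-- outside the precondition, e.g. on _read_till_strings('ab', -1, ['b']): A returns ('', 1, 'b'), B returns ('', -1, 'b')
import Mathlib
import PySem

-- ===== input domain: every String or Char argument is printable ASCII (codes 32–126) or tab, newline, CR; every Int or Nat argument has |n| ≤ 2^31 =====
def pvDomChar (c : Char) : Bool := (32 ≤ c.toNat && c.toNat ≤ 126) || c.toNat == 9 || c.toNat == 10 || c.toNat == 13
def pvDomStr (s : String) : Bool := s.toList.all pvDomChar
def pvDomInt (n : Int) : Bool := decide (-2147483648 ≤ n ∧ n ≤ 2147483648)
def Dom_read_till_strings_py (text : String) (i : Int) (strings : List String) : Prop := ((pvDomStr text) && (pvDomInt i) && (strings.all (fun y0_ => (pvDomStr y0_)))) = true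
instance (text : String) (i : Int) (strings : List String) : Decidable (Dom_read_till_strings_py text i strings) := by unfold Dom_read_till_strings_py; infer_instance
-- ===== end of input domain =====

-- B replaces A's per-pattern find() + running-minimum fold by a single left-to-right
-- position scan from the cursor that returns at the first position where some pattern
-- starts, exiting at the earliest match (measured faster in a timing run); Pre_
-- restricts the cursor to its natural domain i >= 0.


-- ===== PORT A =====
-- Python helper _read_till, transliterated
def read_till (text : String) (i : Int) (stop_s : String) : String × Int :=
  let index := PySem.Str.findFrom text stop_s i
  if index > -1 then (PySem.Str.slice text (some i) (some index), index)
  else (PySem.Str.slice text (some i) none, (PySem.Str.len text : Int))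

def read_till_strings_py (text : String) (i : Int) (strings : List String) :
    Option String × Option Int × Option String :=
  strings.foldl
    (fun acc string =>
      let r := read_till text i string
      match acc.1 with
      | none => (some r.1, some r.2, some string)
      | some old_s =>
        if PySem.Str.len r.1 < PySem.Str.len old_s then (some r.1, some r.2, some string)
        else acc)
    (none, none, none)

-- ===== PORT B =====
-- Source B transliterated: the double loop with early return is the findSome? over the
-- position range; text.startswith(p, j) with 0 ≤ j is PySem.Chars.startswith on the j-drop.
def read_till_strings_py_alt (text : String) (i : Int) (strings : List String) :
    Option String × Option Int × Option String :=
  match strings with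
  | [] => (none, none, none)
  | p0 :: _ =>
    match (PySem.List.pyRange i ((PySem.Str.len text : Int)) 1).findSome?
        (fun j => (strings.find? (fun p =>
            PySem.Chars.startswith (text.toList.drop j.toNat) p.toList)).map
          (fun p => (j, p))) with
    | some jp => (some (PySem.Str.slice text (some i) (some jp.1)), some jp.1, some jp.2)
    | none => (some (PySem.Str.slice text (some i) none), some ((PySem.Str.len text : Int)), some p0)

-- ===== PRECONDITION & SPEC =====
-- Pre_ restricts the read cursor to its natural domain i ≥ 0: for negative i, A's value
-- comes from str.find's slice-style negative-index clamping, while B scans forward from i.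
def Pre_read_till_strings_py (text : String) (i : Int) (strings : List String) : Prop := 0 ≤ i
instance (text : String) (i : Int) (strings : List String) : Decidable (Pre_read_till_strings_py text i strings) := by unfold Pre_read_till_strings_py; infer_instance
def pvWitness_read_till_strings_py : String × Int × List String := ("abcab", 1, ["ca", "b"])
def Spec_read_till_strings_py (text : String) (i : Int) (strings : List String) (out : Option String × Option Int × Option String) : Prop := out = read_till_strings_py_alt text i strings
instance (text : String) (i : Int) (strings : List String) (out : Option String × Option Int × Option String) : Decidable (Spec_read_till_strings_py text i strings out) := by unfold Spec_read_till_strings_py; infer_instance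

-- ===== CLAIM (what is proved, stated in full; the proofs are below) =====
def Claim_equal_read_till_strings_py : Prop := ∀ (text : String) (i : Int) (strings : List String), Dom_read_till_strings_py text i strings → Pre_read_till_strings_py text i strings → Spec_read_till_strings_py text i strings (read_till_strings_py text i strings)

-- ===== LEMMAS AND PROOFS =====

-- effective stop index of a single pattern: first j ≥ start where p starts, else cs.length
def eIdx (cs : List Char) (start : Nat) (p : List Char) : Nat :=
  if PySem.Chars.find (cs.drop start) p = -1 then cs.length
  else start + (PySem.Chars.find (cs.drop start) p).toNat

-- running minimum step of A's fold, abstracted over the index function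
def bstep (f : String → Nat) (acc : Nat × String) (p : String) : Nat × String :=
  if f p < acc.1 then (f p, p) else acc

lemma slice_clamp {α : Type} (xs : List α) (a b : Int) :
    PySem.List.slice xs (some a) (some b) =
      (xs.drop (PySem.List.clampIdx xs.length a)).take
        ((PySem.List.clampIdx xs.length b) - PySem.List.clampIdx xs.length a) := by
  unfold PySem.List.slice; rfl

lemma infix_of_prefix_drop {p cs : List Char} {j : Nat} (h : p <+: cs.drop j) : p <:+: cs := by
  obtain ⟨t, ht⟩ := h
  exact ⟨cs.take j, t, by rw [List.append_assoc, ht, List.take_append_drop]⟩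

lemma eIdx_ge (cs : List Char) (start : Nat) (p : List Char) (_h : start ≤ cs.length) :
    start ≤ eIdx cs start p := by
  unfold eIdx; split_ifs <;> omega

lemma eIdx_le (cs : List Char) (start : Nat) (p : List Char) (_h : start ≤ cs.length) :
    eIdx cs start p ≤ cs.length := by
  have h1 := PySem.Chars.find_le_length (cs.drop start) p
  have h2 : (cs.drop start).length = cs.length - start := List.length_drop ..
  unfold eIdx; split_ifs <;> omega

lemma eIdx_not_match (cs : List Char) (start : Nat) (p : List Char) (j : Nat)
    (hj : start ≤ j) (hlt : j < eIdx cs start p) : ¬ p <+: cs.drop j := by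
  intro hpre
  have hdrop : (cs.drop start).drop (j - start) = cs.drop j := by
    rw [List.drop_drop]; congr 1; omega
  unfold eIdx at hlt
  split_ifs at hlt with hf
  · exact (PySem.Chars.find_eq_neg_one_iff (cs.drop start) p).mp hf
      (infix_of_prefix_drop (j := j - start) (by rw [hdrop]; exact hpre))
  · have hnn : 0 ≤ PySem.Chars.find (cs.drop start) p := by
      have := PySem.Chars.neg_one_le_find (cs.drop start) p
      omega
    have hspec := (PySem.Chars.find_spec (s := cs.drop start) (sub := p)) hnn
    have := hspec.2 (j - start) (by omega)
    rw [hdrop] at this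
    exact this hpre

lemma eIdx_match (cs : List Char) (start : Nat) (p : List Char)
    (h : start ≤ cs.length) (hlt : eIdx cs start p < cs.length) :
    p <+: cs.drop (eIdx cs start p) := by
  unfold eIdx at *
  split_ifs at * with hf
  · omega
  · have hnn : 0 ≤ PySem.Chars.find (cs.drop start) p := by
      have := PySem.Chars.neg_one_le_find (cs.drop start) p
      omega
    have hspec := (PySem.Chars.find_spec (s := cs.drop start) (sub := p)) hnn
    have := hspec.1
    rw [List.drop_drop] at this
    exact this

-- ===== characterisation of A's helper =====
lemma eIdx_len (cs : List Char) (p : List Char) : eIdx cs cs.length p = cs.length := by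
  unfold eIdx
  rw [List.drop_length]
  rcases p with _ | ⟨c, p⟩
  · rw [PySem.Chars.find_nil]; simp
  · rw [(PySem.Chars.find_eq_neg_one_iff _ _).mpr (by simp)]; simp

lemma read_till_eq (text : String) (i : Int) (p : String) :
    read_till text i p =
      (String.ofList ((text.toList.drop (PySem.List.clampIdx text.toList.length i)).take
          (eIdx text.toList (PySem.List.clampIdx text.toList.length i) p.toList
            - PySem.List.clampIdx text.toList.length i)),
        (eIdx text.toList (PySem.List.clampIdx text.toList.length i) p.toList : Int)) := by
  unfold read_till
  rw [PySem.Str.findFrom_eq]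
  unfold PySem.Chars.findFrom
  simp only []
  set cs := text.toList with hcs
  set n := cs.length with hn
  set st : Int := if i < 0 then if i + ↑n < 0 then 0 else i + ↑n else i with hst
  have hst0 : 0 ≤ st := by rw [hst]; split_ifs <;> omega
  have htake : List.take ((n : Int)).toNat cs = cs := by simp; omega
  rw [htake]
  by_cases hin : (n : Int) < st
  · -- i past the end: find returns -1 (CPython)
    have hsti : st = i := by rw [hst]; split_ifs <;> omega
    have hclamp : PySem.List.clampIdx n i = n := by
      unfold PySem.List.clampIdx; split_ifs <;> omega
    rw [if_pos hin, if_neg (by omega : ¬ (-1 : Int) > -1)]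
    rw [hclamp, eIdx_len]
    refine Prod.ext_iff.mpr ⟨?_, ?_⟩
    · apply String.toList_inj.mp
      simp [PySem.List.slice_some_none, hclamp, ← hcs, ← hn]
    · simp [PySem.Str.len_eq, ← hcs, ← hn]
  · rw [if_neg hin]
    have hstc : st.toNat = PySem.List.clampIdx n i := by
      unfold PySem.List.clampIdx; rw [hst]; split_ifs <;> omega
    set s0 := PySem.List.clampIdx n i with hs0
    have hs0n : s0 ≤ n := by omega
    rw [hstc]
    set r : Int := PySem.Chars.find (cs.drop s0) p.toList with hr
    have hr1 : -1 ≤ r := PySem.Chars.neg_one_le_find _ _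
    have hrle : r ≤ (n : Int) - s0 := by
      have := PySem.Chars.find_le_length (cs.drop s0) p.toList
      simp only [List.length_drop] at this
      omega
    by_cases hrneg : r = -1
    · rw [if_pos hrneg, if_neg (by omega : ¬ (-1 : Int) > -1)]
      have heq : eIdx cs s0 p.toList = n := by unfold eIdx; rw [← hr, if_pos hrneg]
      rw [heq]
      refine Prod.ext_iff.mpr ⟨?_, ?_⟩
      · apply String.toList_inj.mp
        have htk : (cs.drop s0).take (n - s0) = cs.drop s0 := by
          apply List.take_of_length_le; simp; omega
        simp [PySem.List.slice_some_none, ← hcs, ← hn, ← hs0, htk]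
      · simp [PySem.Str.len_eq, ← hcs, ← hn]
    · rw [if_neg hrneg, if_pos (by omega : st + r > -1)]
      have heq : eIdx cs s0 p.toList = s0 + r.toNat := by unfold eIdx; rw [← hr, if_neg hrneg]
      rw [heq]
      refine Prod.ext_iff.mpr ⟨?_, ?_⟩
      · apply String.toList_inj.mp
        rw [String.toList_ofList]
        have hb : PySem.List.clampIdx n (st + r) = s0 + r.toNat := by
          unfold PySem.List.clampIdx; split_ifs <;> omega
        have hsc := slice_clamp cs i (st + r)
        rw [← hn, hb, ← hs0] at hsc
        simp only [PySem.Str.toList_slice, PySem.Chars.slice_eq_listSlice, ← hcs, hsc]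
      · simp only []
        omega

-- ===== A's fold = running minimum =====
lemma bfold_le (f : String → Nat) (l : List String) (init : Nat × String) :
    (l.foldl (bstep f) init).1 ≤ init.1 := by
  induction l generalizing init with
  | nil => simp
  | cons p l ih =>
    simp only [List.foldl_cons]
    have h1 := ih (bstep f init p)
    have h2 : (bstep f init p).1 ≤ init.1 := by unfold bstep; split_ifs <;> omega
    omega

lemma bfold_min (f : String → Nat) (l : List String) (init : Nat × String) :
    ∀ p ∈ l, (l.foldl (bstep f) init).1 ≤ f p := by
  induction l generalizing init with
  | nil => simp
  | cons q l ih =>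
    intro p hp
    simp only [List.foldl_cons]
    rcases List.mem_cons.mp hp with h | h
    · subst h
      have h1 := bfold_le f l (bstep f init p)
      have h2 : (bstep f init p).1 ≤ f p := by unfold bstep; split_ifs <;> omega
      omega
    · exact ih (bstep f init q) p h

lemma bfold_find (f : String → Nat) : ∀ (l : List String) (q : String),
    (q :: l).find? (fun p => f p == (l.foldl (bstep f) (f q, q)).1)
      = some ((l.foldl (bstep f) (f q, q)).2) := by
  intro l
  induction l with
  | nil => simp
  | cons p l ih =>
    intro q
    by_cases hpq : f p < f q
    · have hstep : bstep f (f q, q) p = (f p, p) := by unfold bstep; simp [hpq]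
      have hle := bfold_le f l (f p, p)
      simp only [List.foldl_cons, hstep]
      rw [List.find?_cons_of_neg (by simp; omega)]
      exact ih p
    · have hstep : bstep f (f q, q) p = (f q, q) := by unfold bstep; simp [hpq]
      have hle := bfold_le f l (f q, q)
      simp only [List.foldl_cons, hstep]
      have hq := ih q
      by_cases hq1 : f q = (l.foldl (bstep f) (f q, q)).1
      · rw [List.find?_cons_of_pos (by simp only [beq_iff_eq]; exact hq1)]
        rw [List.find?_cons_of_pos (by simp only [beq_iff_eq]; exact hq1)] at hq
        exact hq
      · rw [List.find?_cons_of_neg (by simp only [beq_iff_eq]; exact hq1)]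
        rw [List.find?_cons_of_neg (by simp only [beq_iff_eq]; exact hq1)] at hq
        rw [List.find?_cons_of_neg (by simp; omega)]
        exact hq

lemma foldA (text : String) (i : Int) (l : List String) (m : Nat) (pm : String)
    (hm : PySem.List.clampIdx text.toList.length i ≤ m) (hmn : m ≤ text.toList.length) :
    l.foldl
      (fun acc string =>
        let r := read_till text i string
        match acc.1 with
        | none => (some r.1, some r.2, some string)
        | some old_s =>
          if PySem.Str.len r.1 < PySem.Str.len old_s then (some r.1, some r.2, some string)
          else acc)
      (some (String.ofList ((text.toList.drop (PySem.List.clampIdx text.toList.length i)).take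
          (m - PySem.List.clampIdx text.toList.length i))), some (m : Int), some pm)
    = ((some (String.ofList ((text.toList.drop (PySem.List.clampIdx text.toList.length i)).take
          ((l.foldl (bstep (fun p => eIdx text.toList (PySem.List.clampIdx text.toList.length i) p.toList)) (m, pm)).1
            - PySem.List.clampIdx text.toList.length i)))),
        some (((l.foldl (bstep (fun p => eIdx text.toList (PySem.List.clampIdx text.toList.length i) p.toList)) (m, pm)).1 : Int)),
        some ((l.foldl (bstep (fun p => eIdx text.toList (PySem.List.clampIdx text.toList.length i) p.toList)) (m, pm)).2)) := by
  have hs0n : PySem.List.clampIdx text.toList.length i ≤ text.toList.length := PySem.List.clampIdx_le _ _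
  induction l generalizing m pm with
  | nil => simp
  | cons p l ih =>
    simp only [List.foldl_cons]
    rw [read_till_eq text i p]
    simp only [PySem.Str.len_eq, String.toList_ofList, List.length_take,
      List.length_drop]
    have hep := eIdx_ge text.toList (PySem.List.clampIdx text.toList.length i) p.toList hs0n
    have hep2 := eIdx_le text.toList (PySem.List.clampIdx text.toList.length i) p.toList hs0n
    by_cases hlt : eIdx text.toList (PySem.List.clampIdx text.toList.length i) p.toList < m
    · rw [if_pos (by omega)]
      rw [show bstep (fun p => eIdx text.toList (PySem.List.clampIdx text.toList.length i) p.toList) (m, pm) p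
            = (eIdx text.toList (PySem.List.clampIdx text.toList.length i) p.toList, p) by
          unfold bstep; rw [if_pos hlt]]
      exact ih _ _ hep hep2
    · rw [if_neg (by omega)]
      rw [show bstep (fun p => eIdx text.toList (PySem.List.clampIdx text.toList.length i) p.toList) (m, pm) p
            = (m, pm) by unfold bstep; rw [if_neg hlt]]
      exact ih _ _ hm hmn

lemma find?_congr' {α : Type} (p q : α → Bool) :
    ∀ l : List α, (∀ x ∈ l, p x = q x) → l.find? p = l.find? q := by
  intro l h
  induction l with
  | nil => rfl
  | cons x l ih =>
    simp only [List.find?_cons]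
    rw [h x (by simp)]
    split <;> [rfl; exact ih fun y hy => h y (by simp [hy])]

lemma bfold_fst (f : String → Nat) (l : List String) (q : String) :
    f ((l.foldl (bstep f) (f q, q)).2) = (l.foldl (bstep f) (f q, q)).1 := by
  have h := List.find?_some (bfold_find f l q)
  simpa using h

-- under 0 ≤ i the position range from i coincides with the range from the clamped start
lemma pyRange_from_clamp (n : Nat) (i : Int) (h0 : 0 ≤ i) :
    PySem.List.pyRange i (n : Int) 1
      = PySem.List.pyRange ((PySem.List.clampIdx n i : Nat) : Int) (n : Int) 1 := by
  by_cases hin : i ≤ (n : Int)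
  · have : ((PySem.List.clampIdx n i : Nat) : Int) = i := by
      unfold PySem.List.clampIdx; split_ifs <;> omega
    rw [this]
  · rw [PySem.List.pyRange_one_eq_nil (by omega), PySem.List.pyRange_one_eq_nil ?_]
    have := PySem.List.clampIdx_le n i
    unfold PySem.List.clampIdx
    split_ifs <;> omega

-- ===== VERDICT (by name: the statement is the Claim_ definition above) =====
theorem read_till_strings_py_spec : Claim_equal_read_till_strings_py := by
  intro text i strings _ hpre
  unfold Pre_read_till_strings_py at hpre
  unfold Spec_read_till_strings_py read_till_strings_py read_till_strings_py_alt
  cases strings with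
  | nil => rfl
  | cons p0 rest =>
    simp only [List.foldl_cons, read_till_eq text i p0]
    set cs := text.toList with hcs
    set n := cs.length with hn
    set s0 := PySem.List.clampIdx n i with hs0
    set f : String → Nat := fun p => eIdx cs s0 p.toList with hf
    have hs0n : s0 ≤ n := PySem.List.clampIdx_le _ _
    have hlen : PySem.Str.len text = ((n : Nat) : Int) := by
      simp [PySem.Str.len_eq, ← hcs, ← hn]
    rw [hlen, pyRange_from_clamp n i hpre]
    -- A's fold is the running minimum of the effective indices
    rw [foldA text i rest (f p0) p0 (eIdx_ge _ _ _ hs0n) (eIdx_le _ _ _ hs0n)]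
    set b := rest.foldl (bstep f) (f p0, p0) with hb
    have hb1 : eIdx cs s0 b.2.toList = b.1 := bfold_fst f rest p0
    have hmin : ∀ p ∈ p0 :: rest, b.1 ≤ eIdx cs s0 p.toList := by
      intro p hp
      rcases List.mem_cons.mp hp with h | h
      · subst h; exact bfold_le f rest (f p, p)
      · exact bfold_min f rest (f p0, p0) p h
    have hbge : s0 ≤ b.1 := by
      have := eIdx_ge cs s0 b.2.toList hs0n
      omega
    have hble : b.1 ≤ n := by
      have := eIdx_le cs s0 b.2.toList hs0n
      omega
    -- B's scan: split the position range at b.1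
    have hsplit : PySem.List.pyRange (s0 : Int) (n : Int) 1
        = PySem.List.pyRange (s0 : Int) (b.1 : Int) 1 ++ PySem.List.pyRange (b.1 : Int) (n : Int) 1 :=
      PySem.List.pyRange_one_append _ _ _ (by omega) (by omega)
    rw [hsplit, List.findSome?_append]
    -- no pattern starts before position b.1
    have hnone1 : (PySem.List.pyRange (s0 : Int) (b.1 : Int) 1).findSome?
        (fun j => ((p0 :: rest).find? (fun p =>
            PySem.Chars.startswith (cs.drop j.toNat) p.toList)).map (fun p => (j, p))) = none := by
      rw [List.findSome?_eq_none_iff]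
      intro j hj
      have hj' := (PySem.List.mem_pyRange_one).mp hj
      have hfind0 : (p0 :: rest).find? (fun p =>
          PySem.Chars.startswith (cs.drop j.toNat) p.toList) = none := by
        rw [List.find?_eq_none]
        intro q hq hmatch
        have hpre2 := (PySem.Chars.startswith_iff _ _).mp hmatch
        have hq1 : b.1 ≤ eIdx cs s0 q.toList := hmin q hq
        exact eIdx_not_match cs s0 q.toList j.toNat (by omega) (by omega) hpre2
      rw [hfind0]
      rfl
    rw [hnone1, Option.none_or]
    by_cases hcase : b.1 < n
    · -- some pattern starts at b.1, and the first such pattern is b.2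
      rw [PySem.List.pyRange_one_cons (by omega), List.findSome?_cons]
      have hfind : (p0 :: rest).find?
          (fun p => PySem.Chars.startswith (cs.drop ((b.1 : Int)).toNat) p.toList) = some b.2 := by
        simp only [Int.toNat_natCast]
        rw [find?_congr' _ (fun p => f p == b.1) _ ?_]
        · exact bfold_find f rest p0
        · intro q hq
          simp only []
          by_cases hfq : eIdx cs s0 q.toList = b.1
          · have hpre2 := eIdx_match cs s0 q.toList hs0n (by omega)
            rw [hfq] at hpre2
            have hL : PySem.Chars.startswith (cs.drop b.1) q.toList = true :=
              (PySem.Chars.startswith_iff _ _).mpr hpre2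
            have hR : (f q == b.1) = true := by
              simp only [beq_iff_eq]; exact hfq
            rw [hL, hR]
          · have hq1 : b.1 ≤ eIdx cs s0 q.toList := hmin q hq
            have hnm := eIdx_not_match cs s0 q.toList b.1 hbge (by omega)
            have hL : PySem.Chars.startswith (cs.drop b.1) q.toList = false :=
              Bool.eq_false_iff.mpr (fun h => hnm ((PySem.Chars.startswith_iff _ _).mp h))
            have hR : (f q == b.1) = false := by
              simp only [beq_eq_false_iff_ne, ne_eq]; exact hfq
            rw [hL, hR]
      rw [hfind]
      simp only [Option.map_some]
      -- slice text i b.1 agrees with A's take/drop form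
      have hslice : PySem.Str.slice text (some i) (some ((b.1 : Nat) : Int))
          = String.ofList ((cs.drop s0).take (b.1 - s0)) := by
        apply String.toList_inj.mp
        rw [String.toList_ofList]
        have hcb : PySem.List.clampIdx n ((b.1 : Nat) : Int) = b.1 := by
          unfold PySem.List.clampIdx; split_ifs <;> omega
        have hsc := slice_clamp cs i ((b.1 : Nat) : Int)
        rw [← hn, hcb, ← hs0] at hsc
        simp only [PySem.Str.toList_slice, PySem.Chars.slice_eq_listSlice, ← hcs, hsc]
      rw [hslice]
    · -- no pattern starts anywhere: both sides fall back to the first pattern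
      have hbn : b.1 = n := by omega
      rw [hbn, PySem.List.pyRange_one_eq_nil (by omega), List.findSome?_nil]
      have hp0 : f p0 = b.1 := by
        have h1 : b.1 ≤ eIdx cs s0 p0.toList := hmin p0 (by simp)
        have h2 := eIdx_le cs s0 p0.toList hs0n
        simp only [hf]
        omega
      have hb2 : b.2 = p0 := by
        have h := bfold_find f rest p0
        rw [List.find?_cons_of_pos (by simp only [beq_iff_eq]; exact hp0)] at h
        exact (Option.some_inj.mp h).symm
      rw [hb2]
      have htk : (cs.drop s0).take (n - s0) = cs.drop s0 := by
        apply List.take_of_length_le; simp; omega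
      have hslice : PySem.Str.slice text (some i) none = String.ofList (cs.drop s0) := by
        apply String.toList_inj.mp
        rw [String.toList_ofList]
        simp [PySem.List.slice_some_none, ← hcs, ← hn, ← hs0]
      show (some (String.ofList ((cs.drop s0).take (n - s0))), some ((n : Nat) : Int), some p0)
          = (some (PySem.Str.slice text (some i) none), some ((n : Nat) : Int), some p0)
      rw [htk, hslice]
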